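-- pv_equiv track=rewrite | github.com/Divsatwork/codesignal_solutions | matrixElementsSum.py | matrixElementsSum
-- ===== SOURCE A (Python) =====
-- def matrixElementsSum(matrix):
--     rows = len(matrix)
--     cols = len(matrix[0])
--     f = 0
--
--     def determine(x,y):
--         m = list(range(x))[::-1]
--         for a in m:
--             if matrix[a][y] == 0:
--                 return False
--         return True
--
--     for i in range(rows):
--         for j in range(cols):
--             if matrix[i][j] == 0:
--                 continue
--             if i == 0 and matrix[i][j] != 0:
--                 f+=matrix[i][j]
--             else:
--                 res = determine(i,j)
--                 if res:
--                     f+=matrix[i][j]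
--     return f
-- ===== SOURCE B (Python) =====
-- def matrixElementsSum(matrix):
--     total = 0
--     for j in range(len(matrix[0])):
--         for row in matrix:
--             v = row[j]
--             if v == 0:
--                 break
--             total += v
--     return total
-- ===== Notes on version B (the rewrite author's own statement) =====
-- stated objective: faster
-- what changed: Replaced the row-major double loop that rescans the whole column above every cell with a column-major single pass that breaks at the first zero in each column.
import Mathlib
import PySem

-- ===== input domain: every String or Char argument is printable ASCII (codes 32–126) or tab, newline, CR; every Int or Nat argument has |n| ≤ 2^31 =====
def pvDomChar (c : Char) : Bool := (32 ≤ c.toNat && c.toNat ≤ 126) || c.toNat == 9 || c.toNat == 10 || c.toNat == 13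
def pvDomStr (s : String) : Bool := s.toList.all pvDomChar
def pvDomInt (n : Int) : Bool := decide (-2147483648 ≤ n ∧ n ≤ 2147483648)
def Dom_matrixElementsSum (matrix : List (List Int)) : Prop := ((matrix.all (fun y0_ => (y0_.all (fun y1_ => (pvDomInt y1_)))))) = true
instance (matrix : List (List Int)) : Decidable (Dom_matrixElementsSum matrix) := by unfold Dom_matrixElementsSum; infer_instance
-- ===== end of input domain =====

-- B replaces A's row-major double loop (which rescans the whole column above every cell)
-- by a column-major single pass that stops at the first zero in each column (objective: faster).


-- ===== PORT A =====
-- helper 'determine(x, y)': walks list(range(x))[::-1], returns False at the first zero above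
def determineA (matrix : List (List Int)) (x y : Int) : Bool :=
  ((PySem.List.pyRange 0 x 1).reverse).all
    (fun a => !(PySem.List.pyGetD (PySem.List.pyGetD matrix a []) y 0 == 0))

def matrixElementsSum (matrix : List (List Int)) : Int :=
  let rows : Int := PySem.List.len matrix
  let cols : Int := PySem.List.len (PySem.List.pyGetD matrix 0 [])
  (PySem.List.pyRange 0 rows 1).foldl (fun f i =>
    (PySem.List.pyRange 0 cols 1).foldl (fun f j =>
      let v := PySem.List.pyGetD (PySem.List.pyGetD matrix i []) j 0
      if v == 0 then f
      else if i == 0 && !(v == 0) then f + v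
      else if determineA matrix i j then f + v else f) f) 0

-- ===== PORT B =====
-- inner 'for row in matrix: v = row[j]; if v == 0: break; total += v'
def colSumB (rows : List (List Int)) (j : Int) (acc : Int) : Int :=
  match rows with
  | [] => acc
  | r :: rs =>
    let v := PySem.List.pyGetD r j 0
    if v == 0 then acc else colSumB rs j (acc + v)

def matrixElementsSum_alt (matrix : List (List Int)) : Int :=
  (PySem.List.pyRange 0 (PySem.List.len (PySem.List.pyGetD matrix 0 [])) 1).foldl
    (fun total j => colSumB matrix j total) 0

-- ===== PRECONDITION & SPEC =====
-- Pre_ excludes exactly the inputs on which the Python A raises IndexError: the empty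
-- matrix (matrix[0]) and ragged matrices where some row is shorter than row 0
-- (matrix[i][j] / matrix[a][y] with j < len(matrix[0])); B raises there too.
def Pre_matrixElementsSum (matrix : List (List Int)) : Prop :=
  matrix ≠ [] ∧ ∀ row ∈ matrix, (matrix.headD []).length ≤ row.length
instance (matrix : List (List Int)) : Decidable (Pre_matrixElementsSum matrix) := by
  unfold Pre_matrixElementsSum; infer_instance

def pvWitness_matrixElementsSum : List (List Int) := [[1, 0, 3], [2, 5, 0], [4, 6, 7]]

def Spec_matrixElementsSum (matrix : List (List Int)) (out : Int) : Prop := out = matrixElementsSum_alt matrix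
instance (matrix : List (List Int)) (out : Int) : Decidable (Spec_matrixElementsSum matrix out) := by unfold Spec_matrixElementsSum; infer_instance

-- ===== CLAIM (what is proved, stated in full; the proofs are below) =====
def Claim_equal_matrixElementsSum : Prop := ∀ (matrix : List (List Int)), Dom_matrixElementsSum matrix → Pre_matrixElementsSum matrix → Spec_matrixElementsSum matrix (matrixElementsSum matrix)

-- ===== LEMMAS AND PROOFS =====

-- A's contribution of cell (i, j), read off A's inner-loop body
def cellA (matrix : List (List Int)) (i j : Int) : Int :=
  let v := PySem.List.pyGetD (PySem.List.pyGetD matrix i []) j 0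
  if v == 0 then 0
  else if i == 0 && !(v == 0) then v
  else if determineA matrix i j then v else 0

-- the column j of matrix, with Python-default reads
def colOf (matrix : List (List Int)) (j : Int) : List Int :=
  matrix.map (fun r => PySem.List.pyGetD r j 0)

-- contribution of row n in a plain column list
def eCol (col : List Int) (n : Nat) : Int :=
  if (List.range (n + 1)).all (fun a => !(col.getD a 0 == 0)) then col.getD n 0 else 0

lemma colSumB_acc (ms : List (List Int)) (j : Int) :
    colSumB ms j = fun acc => acc + colSumB ms j 0 := by
  induction ms with
  | nil => funext acc; simp [colSumB]
  | cons r rs ih =>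
    funext acc
    simp only [colSumB]
    split_ifs with h
    · simp
    · rw [ih]; conv_rhs => rw [ih]
      ring

lemma eCol_cons_succ (x : Int) (xs : List Int) (n : Nat) :
    eCol (x :: xs) (n + 1) = if x == 0 then 0 else eCol xs n := by
  unfold eCol
  rw [List.range_succ_eq_map]
  simp only [List.all_cons, List.all_map, Function.comp_def, List.getD_cons_succ,
    List.getD_cons_zero]
  by_cases h : x = 0
  · simp [h]
  · simp [h]

lemma sum_eCol_eq_takeWhile (col : List Int) :
    ((List.range col.length).map (eCol col)).sum
      = (col.takeWhile (fun x => !(x == 0))).sum := by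
  induction col with
  | nil => simp
  | cons x xs ih =>
    rw [List.length_cons, List.range_succ_eq_map]
    simp only [List.map_cons, List.map_map, List.sum_cons, Function.comp_def]
    by_cases h : x = 0
    · subst h
      simp only [eCol_cons_succ]
      simp [eCol, List.takeWhile]
    · have hx : (x == 0) = false := by simpa using h
      have h0 : eCol (x :: xs) 0 = x := by simp [eCol, h]
      simp only [eCol_cons_succ, hx, Bool.false_eq_true, if_false, h0]
      rw [ih, List.takeWhile_cons]
      simp [h]

lemma colSumB_eq_takeWhile (ms : List (List Int)) (j : Int) :
    colSumB ms j 0 = ((colOf ms j).takeWhile (fun x => !(x == 0))).sum := by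
  induction ms with
  | nil => simp [colSumB, colOf]
  | cons r rs ih =>
    by_cases h : PySem.List.pyGetD r j 0 = 0
    · simp [colSumB, colOf, h]
    · have hb : (PySem.List.pyGetD r j 0 == 0) = false := by simpa using h
      simp only [colSumB, colOf, List.map_cons, List.takeWhile_cons, hb,
        Bool.false_eq_true, if_false, Bool.not_false, if_true, List.sum_cons]
      rw [congrFun (colSumB_acc rs j) _, ih]
      simp only [colOf]
      ring

lemma getD_colOf (ms : List (List Int)) (j : Int) (n : Nat) :
    (colOf ms j).getD n 0 = PySem.List.pyGetD (ms.getD n []) j 0 := by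
  induction ms generalizing n with
  | nil => simp [colOf, PySem.List.pyGetD, PySem.List.pyGet?]
  | cons r rs ih =>
    cases n with
    | zero => simp [colOf]
    | succ k => simpa [colOf] using ih k

lemma determineA_eq_all (ms : List (List Int)) (n : Nat) (j : Int) :
    determineA ms (n : Int) j
      = (List.range n).all (fun a => !((colOf ms j).getD a 0 == 0)) := by
  unfold determineA
  rw [List.all_reverse, PySem.List.pyRange_one]
  simp only [sub_zero, Int.toNat_natCast, List.all_map, Function.comp_def, zero_add,
    PySem.List.pyGetD_natCast]
  congr 1
  funext a
  rw [getD_colOf]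

lemma cellA_eq_eCol (ms : List (List Int)) (j : Int) (n : Nat) :
    cellA ms (n : Int) j = eCol (colOf ms j) n := by
  have hd0 : determineA ms ((0 : Nat) : Int) j = true := by
    unfold determineA
    rw [PySem.List.pyRange_one_eq_nil (by omega)]
    rfl
  unfold cellA eCol
  rw [PySem.List.pyGetD_natCast, ← getD_colOf ms j n,
    List.range_succ, List.all_append, List.all_cons, List.all_nil,
    ← determineA_eq_all ms n j]
  by_cases hn : n = 0
  · subst hn
    rw [hd0]
    generalize (colOf ms j).getD 0 0 = g
    cases hb : (g == 0) <;> simp [hb]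
  · have hn' : (((n : Nat) : Int) == 0) = false := by simp; omega
    rw [hn']
    generalize (colOf ms j).getD n 0 = g
    generalize determineA ms (n : Int) j = d
    cases hb : (g == 0) <;> cases d <;> simp [hb]

-- sum over rows of column j equals B's column walk
lemma sum_cellA_col (ms : List (List Int)) (j : Int) :
    ((PySem.List.pyRange 0 (ms.length : Int) 1).map (fun i => cellA ms i j)).sum
      = colSumB ms j 0 := by
  rw [PySem.List.pyRange_one]
  simp only [sub_zero, Int.toNat_natCast, List.map_map, Function.comp_def, zero_add]
  have hmap : (List.range ms.length).map (fun n : Nat => cellA ms (n : Int) j)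
      = (List.range ms.length).map (eCol (colOf ms j)) :=
    List.map_congr_left (fun n _ => cellA_eq_eCol ms j n)
  rw [hmap]
  have hlen : ms.length = (colOf ms j).length := by simp [colOf]
  rw [hlen, sum_eCol_eq_takeWhile, colSumB_eq_takeWhile]

-- swapping the two summations (list version)
lemma sum_sum_comm (l1 : List Int) (l2 : List Int) (g : Int → Int → Int) :
    (l1.map (fun i => (l2.map (fun j => g i j)).sum)).sum
      = (l2.map (fun j => (l1.map (fun i => g i j)).sum)).sum := by
  induction l1 with
  | nil => simp
  | cons x xs ih =>
    simp only [List.map_cons, List.sum_cons, ih]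
    rw [← PySem.List.sum_map_add_int]

theorem matrixElementsSum_eq_alt (matrix : List (List Int)) :
    matrixElementsSum matrix = matrixElementsSum_alt matrix := by
  unfold matrixElementsSum matrixElementsSum_alt
  simp only [PySem.List.len_eq]
  refine Eq.trans (PySem.List.foldl_congr_mem _ _
    (fun f i => f + ((PySem.List.pyRange 0 ((PySem.List.pyGetD matrix 0 []).length : Int) 1).map
      (fun j => cellA matrix i j)).sum) 0 ?_) ?_
  · intro acc i _
    refine Eq.trans (PySem.List.foldl_congr_mem _ _
      (fun f j => f + cellA matrix i j) acc ?_) (PySem.List.foldl_add _ _ acc)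
    intro acc' j _
    simp only [cellA]
    split_ifs <;> omega
  rw [PySem.List.foldl_add, zero_add, sum_sum_comm]
  refine Eq.trans ?_ (PySem.List.foldl_congr_mem _
    (fun total j => total + colSumB matrix j 0) (fun total j => colSumB matrix j total) 0
    (fun acc j _ => (congrFun (colSumB_acc matrix j) acc).symm))
  rw [PySem.List.foldl_add, zero_add]
  exact congrArg List.sum (List.map_congr_left (fun j _ => sum_cellA_col matrix j))

-- ===== VERDICT (by name: the statement is the Claim_ definition above) =====
theorem matrixElementsSum_spec : Claim_equal_matrixElementsSum := by
  intro matrix _ _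
  unfold Spec_matrixElementsSum
  exact matrixElementsSum_eq_alt matrix
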